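-- pv_equiv track=rewrite | github.com/victoryang126/TestFramework-master | SWL/func.py | are_bytearrays_all_same
-- ===== SOURCE A (Python) =====
-- def are_bytearrays_all_same(array_2d):
--     if not array_2d or not array_2d[0]:
--         return False
--     first_bytearray = array_2d[0][0]
--     for row in array_2d:
--         for byte_array in row:
--             if byte_array != first_bytearray:
--                 return False
--     return True
-- ===== SOURCE B (Python) =====
-- def are_bytearrays_all_same(array_2d):
--     if not array_2d or not array_2d[0]:
--         return False
--     flat = [tuple(b) for row in array_2d for b in row]
--     return flat.count(flat[0]) == len(flat)
-- ===== Notes on version B (the rewrite author's own statement) =====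
-- stated objective: alternative
-- what changed: Flattens all bytearrays into one list and checks that the count of the first element equals the list length, instead of A's nested compare-to-first early-exit scan.
import Mathlib
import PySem

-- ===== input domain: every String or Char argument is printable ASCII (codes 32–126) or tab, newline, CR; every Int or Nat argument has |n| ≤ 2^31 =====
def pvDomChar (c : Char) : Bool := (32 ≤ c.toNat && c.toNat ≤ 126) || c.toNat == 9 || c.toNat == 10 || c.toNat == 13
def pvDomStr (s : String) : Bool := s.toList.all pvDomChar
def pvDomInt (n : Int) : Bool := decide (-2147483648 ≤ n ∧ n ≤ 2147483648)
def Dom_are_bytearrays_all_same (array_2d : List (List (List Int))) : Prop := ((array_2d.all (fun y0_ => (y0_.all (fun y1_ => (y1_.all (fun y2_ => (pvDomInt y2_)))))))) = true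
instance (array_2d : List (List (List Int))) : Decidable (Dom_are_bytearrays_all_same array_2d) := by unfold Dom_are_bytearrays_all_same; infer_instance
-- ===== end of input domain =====

-- B flattens all bytearrays into one list and checks that the count of the first element
-- equals the list length, instead of A's nested compare-to-first scan (objective: alternative).

-- ===== PORT A =====
def are_bytearrays_all_same (array_2d : List (List (List Int))) : Bool :=
  match array_2d with
  | [] => false
  | r0 :: _ =>
    match r0 with
    | [] => false
    | first_bytearray :: _ =>
      -- nested for-loops with early 'return False' = all rows, all entries equal the first
      array_2d.all (fun row => row.all (fun byte_array => byte_array == first_bytearray))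

-- ===== PORT B =====
def are_bytearrays_all_same_alt (array_2d : List (List (List Int))) : Bool :=
  if array_2d.isEmpty || (array_2d.headD []).isEmpty then false
  else
    let flat := array_2d.flatMap (fun row => row)
    PySem.List.count flat (flat.headD []) == flat.length

-- ===== PRECONDITION & SPEC =====
def Spec_are_bytearrays_all_same (array_2d : List (List (List Int))) (out : Bool) : Prop := out = are_bytearrays_all_same_alt array_2d
instance (array_2d : List (List (List Int))) (out : Bool) : Decidable (Spec_are_bytearrays_all_same array_2d out) := by unfold Spec_are_bytearrays_all_same; infer_instance

-- ===== CLAIM (what is proved, stated in full; the proofs are below) =====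
def Claim_equal_are_bytearrays_all_same : Prop := ∀ (array_2d : List (List (List Int))), Dom_are_bytearrays_all_same array_2d → Spec_are_bytearrays_all_same array_2d (are_bytearrays_all_same array_2d)

-- ===== LEMMAS AND PROOFS =====

-- ===== VERDICT (by name: the statement is the Claim_ definition above) =====
theorem are_bytearrays_all_same_spec : Claim_equal_are_bytearrays_all_same := by
  intro array_2d _
  unfold Spec_are_bytearrays_all_same are_bytearrays_all_same are_bytearrays_all_same_alt
  match array_2d with
  | [] => rfl
  | [] :: rest => rfl
  | (first :: r0) :: rest =>
    simp only [List.isEmpty_cons, List.headD_cons, Bool.or_false]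
    have hflat : ((first :: r0) :: rest).flatMap (fun row => row)
        = first :: (r0 ++ rest.flatMap (fun row => row)) := by simp
    simp only [hflat, List.headD_cons, PySem.List.count_eq]
    have key : ((((first :: r0) :: rest).all (fun row => row.all (fun b => b == first))) = true)
        ↔ ((List.count first (first :: (r0 ++ rest.flatMap (fun row => row))) == (first :: (r0 ++ rest.flatMap (fun row => row))).length) = true) := by
      rw [beq_iff_eq, List.count_eq_length]
      constructor
      · intro hall x hx
        rcases List.mem_cons.mp hx with hx | hx
        · exact hx.symm
        rcases List.mem_append.mp hx with hx | hx
        · have h1 := List.all_eq_true.mp hall (first :: r0) (by simp)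
          have h2 := List.all_eq_true.mp h1 x (by simp [hx])
          exact (beq_iff_eq.mp (by simpa using h2)).symm
        · rcases List.mem_flatMap.mp hx with ⟨row, hrow, hxr⟩
          have h1 := List.all_eq_true.mp hall row (by simp [hrow])
          have h2 := List.all_eq_true.mp h1 x hxr
          exact (beq_iff_eq.mp (by simpa using h2)).symm
      · intro hall
        apply List.all_eq_true.mpr
        intro row hrow
        apply List.all_eq_true.mpr
        intro b hb
        rcases List.mem_cons.mp hrow with hrow | hrow
        · subst hrow
          rcases List.mem_cons.mp hb with hb | hb
          · simp [hb]
          · have := hall b (by simp [hb])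
            simp [this]
        · have := hall b (by
            exact List.mem_cons_of_mem _ (List.mem_append.mpr (Or.inr (List.mem_flatMap.mpr ⟨row, hrow, hb⟩))))
          simp [this]
    exact Bool.eq_iff_iff.mpr key
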